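-- pv_equiv track=rewrite | github.com/austinmprince/ds-a | trietests.py | trie_tests
-- ===== SOURCE A (Python) =====
-- class Node:
--
--     def __init__(self, value):
--         self.value = value
--         self.children = {}
--
--     def insert(self, s, idx):
--         if idx != len(s):
--             if s[idx] not in self.children:
--                 self.children[s[idx]] = Node(s[idx])
--             self.children.get(s[idx]).insert(s, idx + 1)
--
--     def query(self, s, idx):
--         if idx == len(s):
--             return True
--         elif s[idx] not in self.children:
--             return False
--         else:
--             return self.children.get(s[idx]).query(s, idx + 1)
--
-- def trie_tests(trie_words, test_words):
--     trie = Node('$')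
--     is_in_arr = []
--     for word in trie_words:
--         trie.insert(word, 0)
--
--     for word_x in test_words:
--         is_in_arr.append(trie.query(word_x, 0))
--     return is_in_arr
-- ===== SOURCE B (Python) =====
-- def trie_tests(trie_words, test_words):
--     prefixes = set()
--     for word in trie_words:
--         p = ""
--         prefixes.add(p)
--         for ch in word:
--             p += ch
--             prefixes.add(p)
--     return [w in prefixes or len(w) == 0 for w in test_words]
-- ===== Notes on version B (the rewrite author's own statement) =====
-- stated objective: idiomatic
-- what changed: Replaces the recursive trie of Node objects with a flat set of all prefixes of the inserted words built in one pass, answering each query by a single set-membership test (empty queries are True by the len(w)==0 disjunct, matching the trie).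
import Mathlib
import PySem

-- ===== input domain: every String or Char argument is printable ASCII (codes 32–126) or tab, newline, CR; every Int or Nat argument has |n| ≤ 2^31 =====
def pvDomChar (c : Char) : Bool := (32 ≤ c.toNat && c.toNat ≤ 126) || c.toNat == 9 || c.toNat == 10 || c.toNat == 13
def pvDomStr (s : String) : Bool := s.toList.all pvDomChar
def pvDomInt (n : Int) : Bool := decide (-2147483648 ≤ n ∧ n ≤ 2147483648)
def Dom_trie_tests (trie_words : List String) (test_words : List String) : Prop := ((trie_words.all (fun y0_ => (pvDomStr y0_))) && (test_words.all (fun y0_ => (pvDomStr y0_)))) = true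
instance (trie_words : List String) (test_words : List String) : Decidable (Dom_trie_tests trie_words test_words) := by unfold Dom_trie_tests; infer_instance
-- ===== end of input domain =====

-- B replaces A's recursive trie of nodes with a flat set of all prefixes of the inserted
-- words and a single membership test per query (idiomatic; no speed claim).


-- ===== PORT A =====
-- Node: value + children dict (Char → Node); encoded as a mutual pair (no nested inductive).
mutual
inductive PvTrie where
  | mk : Char → PvChildren → PvTrie
inductive PvChildren where
  | nil : PvChildren
  | cons : Char → PvTrie → PvChildren → PvChildren
end

-- dict lookup: first match
def pvChildGet? : PvChildren → Char → Option PvTrie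
  | .nil, _ => none
  | .cons k n rest, c => if k = c then some n else pvChildGet? rest c

-- dict store: overwrite in place, append if absent
def pvChildSet : PvChildren → Char → PvTrie → PvChildren
  | .nil, c, t => .cons c t .nil
  | .cons k n rest, c, t => if k = c then .cons k t rest else .cons k n (pvChildSet rest c t)

-- Node.insert: the index idx is represented by the remaining character list
def pvInsert : PvTrie → List Char → PvTrie
  | t, [] => t
  | .mk v ch, c :: rest =>
    let child := match pvChildGet? ch c with
      | some n => n
      | none => PvTrie.mk c .nil
    PvTrie.mk v (pvChildSet ch c (pvInsert child rest))

-- Node.query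
def pvQuery : PvTrie → List Char → Bool
  | _, [] => true
  | .mk _ ch, c :: rest =>
    match pvChildGet? ch c with
    | none => false
    | some n => pvQuery n rest

def trie_tests (trie_words : List String) (test_words : List String) : List Bool :=
  let trie := trie_words.foldl (fun t w => pvInsert t w.toList) (PvTrie.mk '$' .nil)
  test_words.foldl (fun acc w => acc ++ [pvQuery trie w.toList]) []

-- ===== PORT B =====
-- inner loop of Source B: p = ""; add p; for ch in word: p += ch; add p
def pvAddPrefixes (s : PySem.Set String) (word : String) : PySem.Set String :=
  (word.toList.foldl
    (fun (st : String × PySem.Set String) ch =>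
      let p := st.1.push ch
      (p, PySem.Set.add st.2 p))
    ("", PySem.Set.add s "")).2

def trie_tests_alt (trie_words : List String) (test_words : List String) : List Bool :=
  let prefixes := trie_words.foldl pvAddPrefixes PySem.Set.empty
  test_words.map (fun w => PySem.Set.contains prefixes w || (PySem.Str.len w == 0))

-- ===== PRECONDITION & SPEC =====
def Spec_trie_tests (trie_words : List String) (test_words : List String) (out : List Bool) : Prop := out = trie_tests_alt trie_words test_words
instance (trie_words : List String) (test_words : List String) (out : List Bool) : Decidable (Spec_trie_tests trie_words test_words out) := by unfold Spec_trie_tests; infer_instance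

-- ===== CLAIM (what is proved, stated in full; the proofs are below) =====
def Claim_equal_trie_tests : Prop := ∀ (trie_words : List String) (test_words : List String), Dom_trie_tests trie_words test_words → Spec_trie_tests trie_words test_words (trie_tests trie_words test_words)

-- ===== LEMMAS AND PROOFS =====

theorem pvChildGet_set : ∀ (ch : PvChildren) (c d : Char) (t : PvTrie),
    pvChildGet? (pvChildSet ch c t) d = if d = c then some t else pvChildGet? ch d
  | .nil, c, d, t => by
      simp only [pvChildSet, pvChildGet?]
      split_ifs with h1 h2 <;> simp_all
  | .cons k n rest, c, d, t => by
      by_cases hk : k = c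
      · subst hk
        rw [show pvChildSet (PvChildren.cons k n rest) k t = PvChildren.cons k t rest from by
              simp [pvChildSet]]
        rw [show pvChildGet? (PvChildren.cons k t rest) d
              = if k = d then some t else pvChildGet? rest d from by simp [pvChildGet?]]
        rw [show pvChildGet? (PvChildren.cons k n rest) d
              = if k = d then some n else pvChildGet? rest d from by simp [pvChildGet?]]
        split_ifs <;> simp_all
      · rw [show pvChildSet (PvChildren.cons k n rest) c t
              = PvChildren.cons k n (pvChildSet rest c t) from by simp [pvChildSet, hk]]
        rw [show pvChildGet? (PvChildren.cons k n (pvChildSet rest c t)) d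
              = if k = d then some n else pvChildGet? (pvChildSet rest c t) d from by
              simp [pvChildGet?]]
        rw [pvChildGet_set rest c d t]
        rw [show pvChildGet? (PvChildren.cons k n rest) d
              = if k = d then some n else pvChildGet? rest d from by simp [pvChildGet?]]
        split_ifs <;> simp_all

theorem pvQuery_nil (t : PvTrie) : pvQuery t [] = true := by
  obtain ⟨v, ch⟩ := t; rfl

theorem pvQuery_nilChildren (v : Char) (s : List Char) :
    pvQuery (PvTrie.mk v .nil) s = decide (s = []) := by
  cases s <;> simp [pvQuery, pvChildGet?]

theorem pvQuery_insert (s : List Char) : ∀ (w : List Char) (t : PvTrie),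
    pvQuery (pvInsert t w) s = (pvQuery t s || decide (s <+: w)) := by
  induction s with
  | nil => intro w t; simp [pvQuery_nil]
  | cons d s' ih =>
      intro w t
      cases w with
      | nil => simp [pvInsert]
      | cons c w' =>
          obtain ⟨v, ch⟩ := t
          simp only [pvInsert, pvQuery, pvChildGet_set]
          by_cases hdc : d = c
          · subst hdc
            cases hg : pvChildGet? ch d with
            | some n =>
                simp [List.cons_prefix_cons]
                exact ih w' n
            | none =>
                cases s' with
                | nil => simp [pvQuery_nil]
                | cons e s'' =>
                    simp only [if_true]
                    rw [ih w' (PvTrie.mk d .nil), pvQuery_nilChildren]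
                    simp [List.cons_prefix_cons]
          · have hp : ¬ (d :: s' <+: c :: w') := by
              simp [List.cons_prefix_cons, hdc]
            simp [if_neg hdc, hp]

theorem pvQuery_foldl (ws : List String) : ∀ (t : PvTrie) (s : List Char),
    pvQuery (ws.foldl (fun t w => pvInsert t w.toList) t) s
      = (pvQuery t s || ws.any (fun w => decide (s <+: w.toList))) := by
  induction ws with
  | nil => intro t s; simp
  | cons w ws ih =>
      intro t s
      simp only [List.foldl_cons, ih, pvQuery_insert, List.any_cons, Bool.or_assoc]

-- B side: membership after the inner character loop
theorem pvMem_inner (l : List Char) : ∀ (p : String) (s : PySem.Set String) (x : String),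
    (x ∈ (l.foldl
      (fun (st : String × PySem.Set String) ch =>
        let q := st.1.push ch
        (q, PySem.Set.add st.2 q)) (p, s)).2)
    ↔ (x ∈ s ∨ ∃ t, t ≠ [] ∧ t <+: l ∧ x.toList = p.toList ++ t) := by
  induction l with
  | nil =>
      intro p s x
      simp
  | cons ch l' ih =>
      intro p s x
      simp only [List.foldl_cons]
      rw [ih]
      constructor
      · rintro (hs | ⟨t, ht, hpre, hx⟩)
        · rw [PySem.Set.mem_add] at hs
          rcases hs with hs | rfl
          · exact Or.inl hs
          · exact Or.inr ⟨[ch], by simp, by simp, by simp⟩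
        · refine Or.inr ⟨ch :: t, by simp, by simp [List.cons_prefix_cons, hpre], ?_⟩
          simpa using hx
      · rintro (hs | ⟨t, ht, hpre, hx⟩)
        · exact Or.inl (by rw [PySem.Set.mem_add]; exact Or.inl hs)
        · cases t with
          | nil => exact absurd rfl ht
          | cons c' t' =>
              rw [List.cons_prefix_cons] at hpre
              obtain ⟨rfl, hpre'⟩ := hpre
              cases t' with
              | nil =>
                  left
                  rw [PySem.Set.mem_add]
                  right
                  apply String.ext
                  simpa using hx
              | cons e t'' =>
                  refine Or.inr ⟨e :: t'', by simp, hpre', ?_⟩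
                  simpa using hx

theorem pvMem_addPrefixes (s : PySem.Set String) (word x : String) :
    x ∈ pvAddPrefixes s word ↔ (x ∈ s ∨ x.toList <+: word.toList) := by
  unfold pvAddPrefixes
  rw [pvMem_inner]
  rw [PySem.Set.mem_add]
  constructor
  · rintro ((hs | rfl) | ⟨t, ht, hpre, hx⟩)
    · exact Or.inl hs
    · exact Or.inr (by simp)
    · simp only [String.toList_empty, List.nil_append] at hx
      exact Or.inr (hx ▸ hpre)
  · rintro (hs | hpre)
    · exact Or.inl (Or.inl hs)
    · cases hx : x.toList with
      | nil =>
          left; right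
          exact String.ext (by simpa using hx)
      | cons c t =>
          exact Or.inr ⟨c :: t, by simp, by rw [← hx]; exact hpre, by simp⟩

theorem pvMem_foldl_addPrefixes (ws : List String) : ∀ (s : PySem.Set String) (x : String),
    x ∈ ws.foldl pvAddPrefixes s ↔ (x ∈ s ∨ ∃ w ∈ ws, x.toList <+: w.toList) := by
  induction ws with
  | nil => intro s x; simp
  | cons w ws ih =>
      intro s x
      simp only [List.foldl_cons, ih, pvMem_addPrefixes, List.mem_cons]
      constructor
      · rintro ((hs | hp) | ⟨u, hu, hp⟩)
        · exact Or.inl hs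
        · exact Or.inr ⟨w, Or.inl rfl, hp⟩
        · exact Or.inr ⟨u, Or.inr hu, hp⟩
      · rintro (hs | ⟨u, (rfl | hu), hp⟩)
        · exact Or.inl (Or.inl hs)
        · exact Or.inl (Or.inr hp)
        · exact Or.inr ⟨u, hu, hp⟩

theorem pv_elem_eq (trie_words : List String) (w : String) :
    pvQuery (trie_words.foldl (fun t u => pvInsert t u.toList) (PvTrie.mk '$' .nil)) w.toList
      = (PySem.Set.contains (trie_words.foldl pvAddPrefixes PySem.Set.empty) w
          || (PySem.Str.len w == 0)) := by
  rw [Bool.eq_iff_iff]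
  rw [pvQuery_foldl, pvQuery_nilChildren]
  constructor
  · intro h
    rcases Bool.or_eq_true_iff.mp h with h | h
    · simp only [decide_eq_true_eq] at h
      refine Bool.or_eq_true_iff.mpr (Or.inr ?_)
      simp [PySem.Str.len, h]
    · simp only [List.any_eq_true, decide_eq_true_eq] at h
      obtain ⟨u, hu, hp⟩ := h
      refine Bool.or_eq_true_iff.mpr (Or.inl ?_)
      rw [PySem.Set.contains_iff, pvMem_foldl_addPrefixes]
      exact Or.inr ⟨u, hu, hp⟩
  · intro h
    rcases Bool.or_eq_true_iff.mp h with h | h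
    · rw [PySem.Set.contains_iff, pvMem_foldl_addPrefixes] at h
      rcases h with h | ⟨u, hu, hp⟩
      · simp [PySem.Set.empty] at h
      · refine Bool.or_eq_true_iff.mpr (Or.inr ?_)
        simp only [List.any_eq_true, decide_eq_true_eq]
        exact ⟨u, hu, hp⟩
    · refine Bool.or_eq_true_iff.mpr (Or.inl ?_)
      simp only [PySem.Str.len, beq_iff_eq] at h
      have hlen : w.toList.length = 0 := by exact_mod_cast h
      simp [List.length_eq_zero_iff.mp hlen]

-- ===== VERDICT (by name: the statement is the Claim_ definition above) =====
theorem trie_tests_spec : Claim_equal_trie_tests := by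
  intro trie_words test_words _
  unfold Spec_trie_tests trie_tests trie_tests_alt
  rw [PySem.List.foldl_append_singleton_eq_map]
  exact List.map_congr_left (fun w _ => pv_elem_eq trie_words w)
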